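-- pv_equiv track=rewrite | github.com/bsofcs/prepCode | marcsCakewalk.py | marcsCakewalk
-- ===== SOURCE A (Python) =====
-- def findPivot(arr,low,high):
--  pivot=arr[high]
--  i=low-1
--  for j in range(low,high):
--   if arr[j]>=pivot:
--    i+=1
--    arr[i],arr[j]=arr[j],arr[i]
--  arr[i+1],arr[high]=arr[high],arr[i+1]
--  return(i+1)
--
-- def QuickSortDesc(arr,low,high):
--  if low>=high:
--   return
--  pivot=findPivot(arr,low,high)
--  QuickSortDesc(arr,low,pivot-1)
--  QuickSortDesc(arr,pivot+1,high)
--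
-- def marcsCakewalk(calorie):
--  n=len(calorie)
--  if n not in range(1,41) or any(x not in range(1,1001) for x in calorie):
--   return None
--  QuickSortDesc(calorie,0,n-1)
--  sumTotal=0
--  for i in range(n):
--   sumTotal+=calorie[i]*(2**i)
--  return sumTotal
-- ===== SOURCE B (Python) =====
-- def marcsCakewalk(calorie):
--     n = len(calorie)
--     if not (1 <= n <= 40) or any(x < 1 or x > 1000 for x in calorie):
--         return None
--     calorie.sort(reverse=True)
--     return sum(c * 2 ** i for i, c in enumerate(calorie))
-- ===== Notes on version B (the rewrite author's own statement) =====
-- stated objective: idiomatic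
-- what changed: replaced the hand-written recursive Lomuto quicksort with the builtin in-place sort(reverse=True) (so the argument is mutated identically) and the index loop with an enumerate-based sum
import Mathlib
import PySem

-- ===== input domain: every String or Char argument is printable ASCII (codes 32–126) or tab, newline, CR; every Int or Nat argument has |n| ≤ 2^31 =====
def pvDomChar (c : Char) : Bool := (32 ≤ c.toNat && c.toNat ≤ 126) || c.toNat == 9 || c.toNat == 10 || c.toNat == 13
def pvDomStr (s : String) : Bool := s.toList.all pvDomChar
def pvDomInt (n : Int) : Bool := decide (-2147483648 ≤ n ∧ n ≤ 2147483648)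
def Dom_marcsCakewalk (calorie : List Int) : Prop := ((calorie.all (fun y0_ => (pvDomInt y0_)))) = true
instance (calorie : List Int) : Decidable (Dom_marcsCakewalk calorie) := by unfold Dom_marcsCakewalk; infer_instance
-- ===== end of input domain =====

-- B replaces A's hand-written recursive Lomuto quicksort by Python's builtin in-place sort(reverse=True)
-- plus an enumerate-based weighted sum (same return value; B also mutates the argument like A does).


-- ===== PORT A =====
def pvSwap (arr : List Int) (i j : Int) : List Int :=
  PySem.List.pySetD (PySem.List.pySetD arr i (PySem.List.pyGetD arr j 0)) j (PySem.List.pyGetD arr i 0)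

def findPivot (arr : List Int) (low high : Int) : List Int × Int :=
  let pivot := PySem.List.pyGetD arr high 0
  let st := (PySem.List.pyRange low high 1).foldl
    (fun (s : List Int × Int) j =>
      if pivot ≤ PySem.List.pyGetD s.1 j 0 then (pvSwap s.1 (s.2 + 1) j, s.2 + 1) else s)
    (arr, low - 1)
  (pvSwap st.1 (st.2 + 1) high, st.2 + 1)

def QuickSortDesc (fuel : Nat) (arr : List Int) (low high : Int) : List Int :=
  match fuel with
  | 0 => arr
  | fuel + 1 =>
    if low ≥ high then arr
    else
      let r := findPivot arr low high
      let a1 := QuickSortDesc fuel r.1 low (r.2 - 1)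
      QuickSortDesc fuel a1 (r.2 + 1) high

def marcsCakewalk (calorie : List Int) : Option Int :=
  let n : Int := calorie.length
  if ¬(1 ≤ n ∧ n < 41) ∨ calorie.any (fun x => ¬(1 ≤ x ∧ x < 1001)) then none
  else
    let srt := QuickSortDesc calorie.length calorie 0 (n - 1)
    some ((PySem.List.pyRange 0 n 1).foldl (fun s i => s + PySem.List.pyGetD srt i 0 * 2 ^ i.toNat) 0)

-- ===== PORT B =====
def marcsCakewalk_alt (calorie : List Int) : Option Int :=
  let n : Int := calorie.length
  if ¬(1 ≤ n ∧ n ≤ 40) ∨ calorie.any (fun x => x < 1 ∨ 1000 < x) then none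
  else
    let s := PySem.List.sorted calorie (fun x => x) true
    some ((PySem.List.enumerate s).foldl (fun acc p => acc + p.2 * 2 ^ p.1.toNat) 0)

-- ===== PRECONDITION & SPEC =====
def Spec_marcsCakewalk (calorie : List Int) (out : Option Int) : Prop := out = marcsCakewalk_alt calorie
instance (calorie : List Int) (out : Option Int) : Decidable (Spec_marcsCakewalk calorie out) := by unfold Spec_marcsCakewalk; infer_instance

-- ===== CLAIM (what is proved, stated in full; the proofs are below) =====
def Claim_equal_marcsCakewalk : Prop := ∀ (calorie : List Int), Dom_marcsCakewalk calorie → Spec_marcsCakewalk calorie (marcsCakewalk calorie)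

-- ===== LEMMAS AND PROOFS =====
lemma getD_at (X : List Int) (c : Int) (Y : List Int) : (X ++ c :: Y).getD X.length 0 = c := by
  induction X with
  | nil => rfl
  | cons h t ih => simpa using ih

lemma set_at (X : List Int) (c v : Int) (Y : List Int) : (X ++ c :: Y).set X.length v = X ++ v :: Y := by
  induction X with
  | nil => rfl
  | cons h t ih => simpa using ih

lemma pvSwap_split (P M R : List Int) (x y : Int) :
    pvSwap (P ++ x :: (M ++ y :: R)) (P.length : Int) ((P.length + (M.length + 1) : Nat) : Int) = P ++ y :: (M ++ x :: R) := by
  unfold pvSwap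
  rw [PySem.List.pyGetD_natCast, PySem.List.pyGetD_natCast, PySem.List.pySetD_natCast, PySem.List.pySetD_natCast]
  have e1 : P ++ x :: (M ++ y :: R) = (P ++ x :: M) ++ y :: R := by simp
  have hlen : P.length + (M.length + 1) = (P ++ x :: M).length := by simp
  rw [e1, hlen, getD_at]
  rw [show (P ++ x :: M) ++ y :: R = P ++ x :: (M ++ y :: R) from e1.symm, getD_at, set_at]
  have e2 : P ++ y :: (M ++ y :: R) = (P ++ y :: M) ++ y :: R := by simp
  have hlen2 : (P ++ x :: M).length = (P ++ y :: M).length := by simp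
  rw [e2, hlen2, set_at]
  simp

lemma pvSwap_self_split (P R : List Int) (x : Int) :
    pvSwap (P ++ x :: R) (P.length : Int) (P.length : Int) = P ++ x :: R := by
  simp [pvSwap, PySem.List.pySetD_natCast, PySem.List.pyGetD_natCast]

lemma pyGetD_append_cons (X : List Int) (c : Int) (Y : List Int) :
    PySem.List.pyGetD (X ++ c :: Y) (X.length : Int) 0 = c := by
  simp [PySem.List.pyGetD_natCast]

lemma msMid (X Y : List ℤ) (a : ℤ) : (↑(X ++ a :: Y) : Multiset ℤ) = {a} + ↑(X ++ Y) := by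
  induction X with
  | nil => simp [← Multiset.cons_coe, Multiset.singleton_add]
  | cons h t ih => simp [← Multiset.cons_coe, ih]

lemma fpLoop_spec (pivot : Int) (M : List Int) : ∀ (P G L R : List Int),
    (∀ x ∈ G, pivot ≤ x) → (∀ x ∈ L, x < pivot) →
    ∃ G' L',
      (PySem.List.pyRange ((P.length + (G.length + L.length) : Nat) : Int)
          ((P.length + (G.length + L.length) + M.length : Nat) : Int) 1).foldl
        (fun (s : List Int × Int) j =>
          if pivot ≤ PySem.List.pyGetD s.1 j 0 then (pvSwap s.1 (s.2 + 1) j, s.2 + 1) else s)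
        (P ++ (G ++ (L ++ (M ++ R))), ((P.length + G.length : Nat) : Int) - 1)
      = (P ++ (G' ++ (L' ++ R)), ((P.length + G'.length : Nat) : Int) - 1)
      ∧ (↑(G' ++ L') : Multiset Int) = ↑(G ++ (L ++ M))
      ∧ (∀ x ∈ G', pivot ≤ x) ∧ (∀ x ∈ L', x < pivot) := by
  induction M with
  | nil =>
    intro P G L R hG hL
    exact ⟨G, L, by simp [PySem.List.pyRange_one_eq_nil], by simp, hG, hL⟩
  | cons c M' ih =>
    intro P G L R hG hL
    rw [PySem.List.pyRange_one_cons (by push_cast [List.length_cons]; omega), List.foldl_cons]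
    have eA : P ++ (G ++ (L ++ (c :: M' ++ R))) = (P ++ G ++ L) ++ c :: (M' ++ R) := by simp
    have ej : ((P.length + (G.length + L.length) : Nat) : Int) = (((P ++ G ++ L).length : Nat) : Int) := by
      simp
    rw [eA, ej, pyGetD_append_cons]
    by_cases hc : pivot ≤ c
    · simp only [hc, if_pos]
      have hG'' : ∀ x ∈ G ++ [c], pivot ≤ x := by
        intro x hx
        rcases List.mem_append.1 hx with h | h
        · exact hG x h
        · simp at h; omega
      have ei1 : ((P.length + G.length : Nat) : Int) - 1 + 1 = ((P ++ G).length : Int) := by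
        push_cast; simp
      rw [ei1]
      cases L with
      | nil =>
        have e2 : (P ++ G ++ ([] : List Int)) ++ c :: (M' ++ R) = (P ++ G) ++ c :: (M' ++ R) := by simp
        have e3 : (((P ++ G ++ ([] : List Int)).length : Nat) : Int) = ((P ++ G).length : Int) := by simp
        rw [e2, e3, pvSwap_self_split]
        obtain ⟨G', L', heq, hperm, hG', hL'⟩ := ih P (G ++ [c]) [] R hG'' (by simp)
        refine ⟨G', L', ?_, ?_, hG', hL'⟩
        · rw [← heq]
          congr 2 <;> first
            | (simp; done)
            | (simp only [List.length_append, List.length_cons, List.length_nil]; done) | (simp only [List.length_append, List.length_cons, List.length_nil]; omega)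
        · rw [hperm]; simp
      | cons l0 Lt =>
        have e2 : (P ++ G ++ (l0 :: Lt)) ++ c :: (M' ++ R) = (P ++ G) ++ l0 :: (Lt ++ c :: (M' ++ R)) := by simp
        have e3 : (((P ++ G ++ (l0 :: Lt)).length : Nat) : Int) = (((P ++ G).length + (Lt.length + 1) : Nat) : Int) := by
          simp; omega
        rw [e2, e3, pvSwap_split]
        have hL'' : ∀ x ∈ Lt ++ [l0], x < pivot := by
          intro x hx
          rcases List.mem_append.1 hx with h | h
          · exact hL x (by simp [h])
          · simp at h; subst h; exact hL _ (by simp)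
        obtain ⟨G', L', heq, hperm, hG', hL'⟩ := ih P (G ++ [c]) (Lt ++ [l0]) R hG'' hL''
        refine ⟨G', L', ?_, ?_, hG', hL'⟩
        · rw [← heq]
          congr 2 <;> first
            | (simp; done)
            | (simp only [List.length_append, List.length_cons, List.length_nil]; done) | (simp only [List.length_append, List.length_cons, List.length_nil]; omega)
        · rw [hperm]
          rw [show (G ++ [c]) ++ ((Lt ++ [l0]) ++ M') = (G ++ [c] ++ Lt) ++ l0 :: M' from by simp,
              show G ++ ((l0 :: Lt) ++ (c :: M')) = G ++ l0 :: (Lt ++ c :: M') from by simp,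
              msMid, msMid G (Lt ++ c :: M'), show (G ++ [c] ++ Lt) ++ M' = G ++ c :: (Lt ++ M') from by simp,
              msMid, show G ++ (Lt ++ c :: M') = (G ++ Lt) ++ c :: M' from by simp, msMid (G ++ Lt)]
          simp
    · simp only [if_neg hc]
      obtain ⟨G', L', heq, hperm, hG', hL'⟩ := ih P G (L ++ [c]) R hG
        (by intro x hx
            rcases List.mem_append.1 hx with h | h
            · exact hL x h
            · simp at h; omega)
      refine ⟨G', L', ?_, ?_, hG', hL'⟩
      · rw [← heq]
        congr 2 <;> first
          | (simp; done)
          | (simp only [List.length_append, List.length_cons, List.length_nil]; done) | (simp only [List.length_append, List.length_cons, List.length_nil]; omega)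
      · rw [hperm]; simp

lemma findPivot_spec (P M S : List Int) (p : Int) :
    ∃ G' L'',
      findPivot (P ++ (M ++ p :: S)) (P.length : Int) ((P.length + M.length : Nat) : Int)
        = (P ++ (G' ++ p :: (L'' ++ S)), ((P.length + G'.length : Nat) : Int))
      ∧ (↑(G' ++ L'') : Multiset Int) = ↑M ∧ (∀ x ∈ G', p ≤ x) ∧ (∀ x ∈ L'', x < p) := by
  obtain ⟨G', L', heq, hperm, hG', hL'⟩ := fpLoop_spec p M P [] [] (p :: S) (by simp) (by simp)
  have hpiv : PySem.List.pyGetD (P ++ (M ++ p :: S)) ((P.length + M.length : Nat) : Int) 0 = p := by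
    rw [show P ++ (M ++ p :: S) = (P ++ M) ++ p :: S from by simp,
        show ((P.length + M.length : Nat) : Int) = ((P ++ M).length : Int) from by simp]
    exact pyGetD_append_cons _ _ _
  have hlen : G'.length + L'.length = M.length := by
    have := congrArg Multiset.card hperm; simpa using this
  have hfold :
      (PySem.List.pyRange (P.length : Int) ((P.length + M.length : Nat) : Int) 1).foldl
        (fun (s : List Int × Int) j =>
          if p ≤ PySem.List.pyGetD s.1 j 0 then (pvSwap s.1 (s.2 + 1) j, s.2 + 1) else s)
        (P ++ (M ++ p :: S), (P.length : Int) - 1)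
      = (P ++ (G' ++ (L' ++ p :: S)), ((P.length + G'.length : Nat) : Int) - 1) := by
    rw [← heq]
    congr 2 <;> first
      | (simp; done)
      | (simp only [List.length_append, List.length_cons, List.length_nil]; done)
      | (simp only [List.length_append, List.length_cons, List.length_nil]; omega)
  simp only [findPivot, hpiv, hfold]
  cases L' with
  | nil =>
    refine ⟨G', [], ?_, by simpa using hperm, hG', by simp⟩
    have e1 : P ++ (G' ++ ([] ++ p :: S)) = (P ++ G') ++ p :: S := by simp
    have e2 : ((P.length + G'.length : Nat) : Int) - 1 + 1 = ((P ++ G').length : Int) := by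
      simp only [List.length_append]; push_cast; omega
    have e3 : ((P.length + M.length : Nat) : Int) = ((P ++ G').length : Int) := by
      simp only [List.length_append]; simp at hlen; omega
    simp only [e1, e2, e3, pvSwap_self_split]
    all_goals refine Prod.ext (by simp) (by simp <;> omega)
  | cons m0 Mt =>
    refine ⟨G', Mt ++ [m0], ?_, ?_, hG', ?_⟩
    · have e1 : P ++ (G' ++ ((m0 :: Mt) ++ p :: S)) = (P ++ G') ++ m0 :: (Mt ++ p :: S) := by simp
      have e2 : ((P.length + G'.length : Nat) : Int) - 1 + 1 = ((P ++ G').length : Int) := by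
        simp only [List.length_append]; push_cast; omega
      have e3 : ((P.length + M.length : Nat) : Int) = (((P ++ G').length + (Mt.length + 1) : Nat) : Int) := by
        simp only [List.length_append]; simp at hlen; omega
      simp only [e1, e2, e3, pvSwap_split]
      all_goals refine Prod.ext (by simp) (by simp <;> omega)
    · simp only [List.nil_append] at hperm
      rw [show G' ++ (Mt ++ [m0]) = (G' ++ Mt) ++ m0 :: [] from by simp, msMid]
      rw [← hperm, msMid G' Mt]
      simp
    · intro x hx
      rcases List.mem_append.1 hx with h | h
      · exact hL' x (by simp [h])
      · simp at h; subst h; exact hL' _ (by simp)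

lemma qsd_spec : ∀ (fuel : Nat), ∀ (M P S : List Int), M.length ≤ fuel →
    ∃ M', QuickSortDesc fuel (P ++ (M ++ S)) (P.length : Int) (((P.length + M.length : Nat) : Int) - 1) = P ++ (M' ++ S)
      ∧ (↑M' : Multiset Int) = ↑M ∧ M'.Pairwise (fun a b => b ≤ a) := by
  intro fuel
  induction fuel with
  | zero =>
    intro M P S hf
    have : M = [] := List.eq_nil_of_length_eq_zero (by omega)
    subst this
    exact ⟨[], by simp [QuickSortDesc], rfl, by simp⟩
  | succ f ih =>
    intro M P S hf
    simp only [QuickSortDesc]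
    by_cases hlh : (P.length : Int) ≥ ((P.length + M.length : Nat) : Int) - 1
    · refine ⟨M, by rw [if_pos hlh], rfl, ?_⟩
      match M with
      | [] => simp
      | [x] => simp
      | x :: y :: t => exfalso; simp only [List.length_cons] at hlh; omega
    · rw [if_neg hlh]
      rcases List.eq_nil_or_concat M with rfl | ⟨M₀, p, rfl⟩
      · exfalso; exact hlh (by simp)
      · simp only [List.concat_eq_append] at hf hlh ⊢
        have harr : P ++ ((M₀ ++ [p]) ++ S) = P ++ (M₀ ++ p :: S) := by simp
        have ehigh : ((P.length + (M₀ ++ [p]).length : Nat) : Int) - 1 = ((P.length + M₀.length : Nat) : Int) := by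
          simp only [List.length_append, List.length_cons, List.length_nil]; push_cast; omega
        rw [harr, ehigh]
        obtain ⟨G', L'', hfp, hperm, hG', hL''⟩ := findPivot_spec P M₀ S p
        rw [hfp]
        have hlen2 : G'.length + L''.length = M₀.length := by
          have := congrArg Multiset.card hperm; simpa using this
        have hM0f : M₀.length ≤ f := by simp at hf; omega
        obtain ⟨G'', hq1, hmsG, hpwG⟩ := ih G' P (p :: (L'' ++ S)) (by omega)
        simp only [hq1]
        have hlenG : G''.length = G'.length := by
          have := congrArg Multiset.card hmsG; simpa using this
        have e3 : P ++ (G'' ++ (p :: (L'' ++ S))) = (P ++ (G'' ++ [p])) ++ (L'' ++ S) := by simp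
        have e4 : ((P.length + G'.length : Nat) : Int) + 1 = ((P ++ (G'' ++ [p])).length : Int) := by
          simp only [List.length_append, List.length_cons, List.length_nil]; push_cast; omega
        have e5 : ((P.length + M₀.length : Nat) : Int) = (((P ++ (G'' ++ [p])).length + L''.length : Nat) : Int) - 1 := by
          simp only [List.length_append, List.length_cons, List.length_nil]; push_cast; omega
        rw [e3, e4, e5]
        obtain ⟨L''', hq2, hmsL, hpwL⟩ := ih L'' (P ++ (G'' ++ [p])) S (by omega)
        rw [hq2]
        have hmemG : ∀ x, x ∈ G'' ↔ x ∈ G' := fun x => (Multiset.coe_eq_coe.mp hmsG).mem_iff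
        have hmemL : ∀ x, x ∈ L''' ↔ x ∈ L'' := fun x => (Multiset.coe_eq_coe.mp hmsL).mem_iff
        refine ⟨G'' ++ p :: L''', by simp, ?_, ?_⟩
        · rw [msMid, show (M₀ ++ [p] : List Int) = M₀ ++ p :: [] from rfl, msMid]
          simp only [List.append_nil]
          have hsum : (↑(G'' ++ L''') : Multiset ℤ) = ↑M₀ := by
            rw [← hperm]
            exact Multiset.coe_eq_coe.mpr ((Multiset.coe_eq_coe.mp hmsG).append (Multiset.coe_eq_coe.mp hmsL))
          rw [hsum]
        · rw [List.pairwise_append]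
          refine ⟨hpwG, ?_, ?_⟩
          · rw [List.pairwise_cons]
            exact ⟨fun b hb => le_of_lt (hL'' b ((hmemL b).mp hb)), hpwL⟩
          · intro a ha b hb
            have hap : p ≤ a := hG' a ((hmemG a).mp ha)
            rcases List.mem_cons.1 hb with rfl | hb'
            · exact hap
            · exact le_trans (le_of_lt (hL'' b ((hmemL b).mp hb'))) hap

lemma sum_shape (xs : List Int) : ∀ (pre : List Int) (acc : Int),
    (PySem.List.pyRange (pre.length : Int) ((pre.length + xs.length : Nat) : Int) 1).foldl
      (fun s i => s + PySem.List.pyGetD (pre ++ xs) i 0 * 2 ^ i.toNat) acc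
    = (PySem.List.enumerate xs (pre.length : Int)).foldl (fun a p => a + p.2 * 2 ^ p.1.toNat) acc := by
  induction xs with
  | nil => intro pre acc; simp [PySem.List.pyRange_one_eq_nil, PySem.List.enumerate]
  | cons x t ih =>
    intro pre acc
    rw [PySem.List.pyRange_one_cons (by push_cast [List.length_cons]; omega)]
    rw [List.foldl_cons, pyGetD_append_cons]
    have e1 : pre ++ x :: t = (pre ++ [x]) ++ t := by simp
    have e2 : ((pre.length : Int) + 1) = ((pre ++ [x]).length : Int) := by simp
    have e3 : ((pre.length + (x :: t).length : Nat) : Int) = (((pre ++ [x]).length + t.length : Nat) : Int) := by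
      simp; omega
    rw [e1, e2, e3, ih (pre ++ [x])]
    simp [PySem.List.enumerate_cons]

lemma main_eq (calorie : List Int) : marcsCakewalk calorie = marcsCakewalk_alt calorie := by
  unfold marcsCakewalk marcsCakewalk_alt
  have hcond : (¬(1 ≤ (calorie.length : Int) ∧ (calorie.length : Int) < 41) ∨ calorie.any (fun x => ¬(1 ≤ x ∧ x < 1001)) = true)
      ↔ (¬(1 ≤ (calorie.length : Int) ∧ (calorie.length : Int) ≤ 40) ∨ calorie.any (fun x => x < 1 ∨ 1000 < x) = true) := by
    have hany : (fun x : Int => decide ¬(1 ≤ x ∧ x < 1001)) = (fun x : Int => decide (x < 1 ∨ 1000 < x)) := by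
      funext x
      simp only [decide_eq_decide]
      omega
    constructor
    · rintro (h | h)
      · exact Or.inl (by omega)
      · exact Or.inr (by rw [hany] at h; exact h)
    · rintro (h | h)
      · exact Or.inl (by omega)
      · exact Or.inr (by rw [hany]; exact h)
  by_cases hg : (¬(1 ≤ (calorie.length : Int) ∧ (calorie.length : Int) < 41) ∨ calorie.any (fun x => ¬(1 ≤ x ∧ x < 1001)) = true)
  · rw [if_pos hg, if_pos (hcond.mp hg)]
  · rw [if_neg hg, if_neg (fun h => hg (hcond.mpr h))]
    -- sorted lists agree
    obtain ⟨M', hq, hms, hpw⟩ := qsd_spec calorie.length calorie [] [] (le_refl _)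
    simp only [List.nil_append, List.append_nil, List.length_nil, Nat.zero_add, Nat.cast_zero] at hq
    have hq' : QuickSortDesc calorie.length calorie 0 ((calorie.length : Int) - 1) = M' := by
      rw [← hq]
    rw [hq']
    have hperm : M'.Perm calorie := Multiset.coe_eq_coe.mp hms
    have hsorted : PySem.List.sorted calorie (fun x => x) true = M' := by
      apply ((PySem.List.sorted_perm _ _ _).trans hperm.symm).eq_of_pairwise
        (fun a b _ _ h1 h2 => by omega)
        (by simpa using PySem.List.sorted_pairwise_rev (xs := calorie) (key := fun x => x)) hpw
    rw [hsorted]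
    have hlen : M'.length = calorie.length := hperm.length_eq
    have := sum_shape M' [] 0
    simp only [List.length_nil, Nat.cast_zero, Nat.zero_add, List.nil_append] at this
    rw [show ((calorie.length : Nat) : Int) = ((M'.length : Nat) : Int) from by rw [hlen]]
    exact congrArg some this

-- ===== VERDICT (by name: the statement is the Claim_ definition above) =====
theorem marcsCakewalk_spec : Claim_equal_marcsCakewalk := by
  intro calorie _
  unfold Spec_marcsCakewalk
  exact main_eq calorie
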